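-- pv_equiv track=rewrite | github.com/JODONG2/ALGORITHM | PROGRAMMERS/temp3.py | solution
-- ===== SOURCE A (Python) =====
-- from collections import deque
--
-- def ShiftRow(rc):
--     rc.appendleft(rc.pop())
--
-- def Rotate(rc,R,C):
--     ru = rc[0][C-1]
--     ld = rc[R-1][0]
--     rc[0].rotate(1)
--     rc[R-1].rotate(-1)
--     for i in range(R,2,-1):
--         rc[R-i][0] = rc[R-i+1][0]
--         rc[i-1][C-1] = rc[i-2][C-1]
--     rc[1][C-1] = ru
--     rc[R-2][0] = ld
--
-- def solution(rc, operations):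
--     answer = [[]]
--     R = len(rc)
--     C = len(rc[0])
--     for i in range(R):
--         rc[i] = deque(rc[i])
--     rc = deque(rc)
--     for operation in operations:
--         if operation == "Rotate":
--             Rotate(rc,R,C)
--         else:
--             ShiftRow(rc)
--     answer = [list(rc[i]) for i in range(R)]
--     return answer
-- ===== SOURCE B (Python) =====
-- def solution(rc, operations):
--     g = [list(row) for row in rc]
--     for op in operations:
--         if op == "Rotate":
--             R = len(g)
--             top = [g[1][0]] + g[0][:-1]
--             mid = [[nxt[0]] + cur[1:-1] + [prv[-1]]
--                    for prv, cur, nxt in zip(g, g[1:], g[2:])]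
--             bot = g[-1][1:] + [g[-2][-1]]
--             g = [top] + mid + [bot]
--         else:
--             g = [g[-1]] + g[:-1]
--     return g
-- ===== Notes on version B (the rewrite author's own statement) =====
-- stated objective: simpler
-- what changed: A mutates a deque-of-deques in place (row rotations plus two sequential index-shift loops and corner patch-ups); B rebuilds the grid functionally in one pass, constructing each new row from its neighbours (zip of consecutive row triples), with no in-place mutation.
-- outside the precondition, e.g. on solution([[1], [2], [3]], ['Rotate']): A returns [[2], [3], [2]], B returns [[2], [3, 1], [2]]; on solution([[1, 2], [3, 4, 5]], ['Rotate']): A returns [[3, 1], [4, 2, 3]], B returns [[3, 1], [4, 5, 2]]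
import Mathlib
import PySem

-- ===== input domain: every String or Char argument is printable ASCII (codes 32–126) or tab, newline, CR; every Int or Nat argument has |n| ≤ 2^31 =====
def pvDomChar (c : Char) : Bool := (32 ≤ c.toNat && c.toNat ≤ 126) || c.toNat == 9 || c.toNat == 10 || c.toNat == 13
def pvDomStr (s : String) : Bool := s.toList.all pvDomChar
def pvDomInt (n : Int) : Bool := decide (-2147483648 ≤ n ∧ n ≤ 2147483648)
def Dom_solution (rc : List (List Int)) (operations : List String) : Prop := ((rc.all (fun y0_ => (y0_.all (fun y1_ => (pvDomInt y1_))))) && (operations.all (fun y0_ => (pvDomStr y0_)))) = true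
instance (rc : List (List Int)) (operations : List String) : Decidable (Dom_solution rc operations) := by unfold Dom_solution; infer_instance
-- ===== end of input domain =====

-- B rebuilds the grid functionally (each new row from its neighbour rows) instead of A's in-place deque
-- surgery; equivalence is about the RETURN value only: Python A replaces the caller's rows with deques
-- in place, B does not mutate its argument.

-- ===== PORT A =====
-- A-side helpers: cell read/write on the grid (indices are in range and non-negative under Pre_, where
-- this is exact Python indexing; Python raises out of range, which Pre_ excludes).
def agetf (g : List (List Int)) (i j : Nat) : Int := (g.getD i []).getD j 0
def aset (g : List (List Int)) (i j : Nat) (v : Int) : List (List Int) := g.modify i (fun r => r.set j v)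
-- deque.rotate(1): last element to the front (exact for rotation by one)
def rotR (row : List Int) : List Int := row.drop (row.length - 1) ++ row.dropLast
-- deque.rotate(-1): first element to the back
def rotL (row : List Int) : List Int := row.drop 1 ++ row.take 1
-- ShiftRow: rc.appendleft(rc.pop()) — last row to the front (rc nonempty under Pre_)
def shiftA (g : List (List Int)) : List (List Int) := g.drop (g.length - 1) ++ g.dropLast

def rotateA (g : List (List Int)) (R C : Nat) : List (List Int) :=
  let ru := agetf g 0 (C-1)
  let ld := agetf g (R-1) 0
  let g1 := g.modify 0 rotR
  let g2 := g1.modify (R-1) rotL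
  let g3 := (PySem.List.pyRange (R : Int) 2 (-1)).foldl
    (fun h i =>
      let h1 := aset h (R - i.toNat) 0 (agetf h (R - i.toNat + 1) 0)
      aset h1 (i.toNat - 1) (C-1) (agetf h1 (i.toNat - 2) (C-1))) g2
  let g4 := aset g3 1 (C-1) ru
  aset g4 (R-2) 0 ld

def solution (rc : List (List Int)) (operations : List String) : List (List Int) :=
  let R := rc.length
  let C := (rc.getD 0 []).length
  let g := operations.foldl (fun g op => if op == "Rotate" then rotateA g R C else shiftA g) rc
  (List.range R).map (fun i => g.getD i [])

-- ===== PORT B =====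
-- B-side helpers (slices [:-1], [1:], [1:-1] are exact as dropLast / drop 1 / drop 1 ∘ dropLast;
-- row[-1] and row[0] are in range under Pre_)
def bLast (row : List Int) : Int := row.getD (row.length - 1) 0

def bRow (prv cur nxt : List Int) : List Int :=
  nxt.getD 0 0 :: ((cur.drop 1).dropLast ++ [bLast prv])

def rotateB (g : List (List Int)) : List (List Int) :=
  let top := (g.getD 1 []).getD 0 0 :: (g.getD 0 []).dropLast
  let mid := List.zipWith3 bRow g (g.drop 1) (g.drop 2)
  let bot := (g.getD (g.length - 1) []).drop 1 ++ [bLast (g.getD (g.length - 2) [])]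
  top :: (mid ++ [bot])

-- [g[-1]] + g[:-1]  (g[-1] is in range under Pre_, where this is exact)
def shiftB (g : List (List Int)) : List (List Int) := g.getD (g.length - 1) [] :: g.dropLast

def solution_alt (rc : List (List Int)) (operations : List String) : List (List Int) :=
  operations.foldl (fun g op => if op == "Rotate" then rotateB g else shiftB g) rc

-- ===== PRECONDITION & SPEC =====
-- Pre_ restricts to the problem's natural domain: a nonempty grid, and — whenever a "Rotate" operation
-- occurs — a rectangular grid with at least 2 rows and 2 columns; outside it A either raises
-- (empty grid, single row, too-short rows) or its border rotation on single-column or ragged grids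
-- overwrites/mixes cells, an artefact of its index surgery (see the cites).
def Pre_solution (rc : List (List Int)) (operations : List String) : Prop :=
  rc ≠ [] ∧ ("Rotate" ∈ operations →
    2 ≤ rc.length ∧ 2 ≤ (rc.getD 0 []).length ∧ ∀ row ∈ rc, row.length = (rc.getD 0 []).length)
instance (rc : List (List Int)) (operations : List String) : Decidable (Pre_solution rc operations) := by unfold Pre_solution; infer_instance

def pvWitness_solution : List (List Int) × List String := ([[1,2],[3,4]], ["Rotate", "ShiftRow"])

def Spec_solution (rc : List (List Int)) (operations : List String) (out : List (List Int)) : Prop := out = solution_alt rc operations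
instance (rc : List (List Int)) (operations : List String) (out : List (List Int)) : Decidable (Spec_solution rc operations out) := by unfold Spec_solution; infer_instance

-- ===== CLAIM (what is proved, stated in full; the proofs are below) =====
def Claim_equal_solution : Prop := ∀ (rc : List (List Int)) (operations : List String), Dom_solution rc operations → Pre_solution rc operations → Spec_solution rc operations (solution rc operations)

-- ===== LEMMAS AND PROOFS =====

-- rectangularity
def Rect (g : List (List Int)) (R C : Nat) : Prop :=
  g.length = R ∧ ∀ row ∈ g, row.length = C

-- the pointwise description both rotations are shown to satisfy on an R×C grid (R,C ≥ 2)
def specCell (g : List (List Int)) (R C i j : Nat) : Int :=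
  if i = 0 then (if j = 0 then agetf g 1 0 else agetf g 0 (j-1))
  else if i = R-1 then (if j = C-1 then agetf g (R-2) (C-1) else agetf g (R-1) (j+1))
  else if j = 0 then agetf g (i+1) 0
  else if j = C-1 then agetf g (i-1) (C-1)
  else agetf g i j

-- A's loop in clean form
def stepN (R C : Nat) (h : List (List Int)) (n : Nat) : List (List Int) :=
  aset (aset h n 0 (agetf h (n+1) 0)) (R-1-n) (C-1)
    (agetf (aset h n 0 (agetf h (n+1) 0)) (R-2-n) (C-1))

def h0def (g : List (List Int)) (R : Nat) : List (List Int) :=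
  (g.modify 0 rotR).modify (R-1) rotL

-- getD / cell toolbox
lemma getDr (r : List Int) (k : Nat) (h : k < r.length) : r.getD k 0 = r[k] := by
  rw [List.getD_eq_getElem?_getD, List.getElem?_eq_getElem h]; rfl

lemma getDrow (g : List (List Int)) (k : Nat) (h : k < g.length) : g.getD k [] = g[k] := by
  rw [List.getD_eq_getElem?_getD, List.getElem?_eq_getElem h]; rfl

lemma agetf_congr (g : List (List Int)) {a b c d : Nat} (h1 : a = c) (h2 : b = d) :
    agetf g a b = agetf g c d := by rw [h1, h2]

lemma getD_modify (g : List (List Int)) (i j : Nat) (f : List Int → List Int) :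
    (g.modify i f).getD j [] = if i = j ∧ j < g.length then f (g.getD j []) else g.getD j [] := by
  simp only [List.getD_eq_getElem?_getD, List.getElem?_modify]
  by_cases hj : j < g.length
  · rw [List.getElem?_eq_getElem hj]
    by_cases hij : i = j <;> simp [hij, hj]
  · rw [List.getElem?_eq_none (by omega)]
    simp [hj]

lemma getD_set (row : List Int) (j j' : Nat) (v : Int) :
    (row.set j v).getD j' 0 = if j = j' ∧ j' < row.length then v else row.getD j' 0 := by
  simp only [List.getD_eq_getElem?_getD, List.getElem?_set]
  by_cases hj : j' < row.length
  · by_cases hij : j = j' <;> simp [hij, hj]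
  · by_cases hij : j = j' <;> simp [hij, hj] <;> omega

lemma length_aset (g : List (List Int)) (i j : Nat) (v : Int) : (aset g i j v).length = g.length := by
  simp [aset]

lemma rowlen_aset (g : List (List Int)) (i j : Nat) (v : Int) (i' : Nat) :
    ((aset g i j v).getD i' []).length = (g.getD i' []).length := by
  rw [aset, getD_modify]
  split <;> simp

lemma agetf_aset (g : List (List Int)) (i j : Nat) (v : Int) (i' j' : Nat) :
    agetf (aset g i j v) i' j' =
      if i = i' ∧ i' < g.length ∧ j = j' ∧ j' < (g.getD i' []).length then v
      else agetf g i' j' := by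
  rw [agetf, aset, getD_modify]
  by_cases hi : i = i' ∧ i' < g.length
  · rw [if_pos hi, getD_set]
    rcases hi with ⟨h1, h2⟩
    by_cases hj : j = j' ∧ j' < (g.getD i' []).length
    · simp [hj, h1, h2, agetf]
    · rw [if_neg hj, if_neg (by tauto), agetf]
  · rw [if_neg hi, if_neg (by tauto), agetf]

lemma grid_ext (g1 g2 : List (List Int))
    (h1 : g1.length = g2.length)
    (h2 : ∀ i, i < g1.length → (g1.getD i []).length = (g2.getD i []).length)
    (h3 : ∀ i j, i < g1.length → j < (g1.getD i []).length → agetf g1 i j = agetf g2 i j) :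
    g1 = g2 := by
  apply List.ext_getElem h1
  intro i hi1 hi2
  rw [← getDrow g1 i hi1, ← getDrow g2 i hi2]
  apply List.ext_getElem (h2 i hi1)
  intro j hj1 hj2
  rw [← getDr _ _ hj1, ← getDr _ _ hj2]
  exact h3 i j hi1 hj1

lemma rect_rowlen {g : List (List Int)} {R C : Nat} (hrect : Rect g R C) (i : Nat) (hi : i < R) :
    (g.getD i []).length = C := by
  obtain ⟨hlen, hrow⟩ := hrect
  have h : i < g.length := by omega
  rw [getDrow g i h]
  exact hrow _ (List.getElem_mem h)

lemma rotR_len (row : List Int) : (rotR row).length = row.length := by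
  simp [rotR]

lemma rotL_len (row : List Int) : (rotL row).length = row.length := by
  simp [rotL]
  omega

lemma rotR_getD (row : List Int) (j : Nat) (hj : j < row.length) :
    (rotR row).getD j 0 = if j = 0 then row.getD (row.length - 1) 0 else row.getD (j-1) 0 := by
  rw [getDr _ _ (by rw [rotR_len]; omega)]
  by_cases h0 : j = 0
  · subst h0
    rw [if_pos rfl, getDr _ _ (by omega)]
    simp only [rotR, List.getElem_append, List.length_drop]
    rw [dif_pos (by omega)]
    simp [List.getElem_drop]
  · rw [if_neg h0, getDr _ _ (by omega)]
    simp only [rotR, List.getElem_append, List.length_drop]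
    rw [dif_neg (by omega)]
    simp only [List.getElem_dropLast]
    congr 1
    omega

lemma rotL_getD (row : List Int) (j : Nat) (hj : j < row.length) :
    (rotL row).getD j 0 = if j = row.length - 1 then row.getD 0 0 else row.getD (j+1) 0 := by
  rw [getDr _ _ (by rw [rotL_len]; omega)]
  by_cases h0 : j = row.length - 1
  · rw [if_pos h0, getDr _ _ (by omega)]
    simp only [rotL, List.getElem_append, List.length_drop]
    rw [dif_neg (by omega)]
    simp only [List.getElem_take]
    congr 1 <;> omega
  · rw [if_neg h0, getDr _ _ (by omega)]
    simp only [rotL, List.getElem_append, List.length_drop]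
    rw [dif_pos (by omega)]
    simp only [List.getElem_drop]
    congr 1
    omega

-- h0 facts
lemma h0_len (g : List (List Int)) (R : Nat) : (h0def g R).length = g.length := by
  simp [h0def]

lemma h0_rowlen (g : List (List Int)) (R i : Nat) :
    ((h0def g R).getD i []).length = (g.getD i []).length := by
  rw [h0def, getD_modify]
  split
  · rw [rotL_len, getD_modify]; split <;> simp [rotR_len]
  · rw [getD_modify]; split <;> simp [rotR_len]

lemma h0_mid (g : List (List Int)) (R i j : Nat) (h1 : 1 ≤ i) (h2 : i < R - 1) :
    agetf (h0def g R) i j = agetf g i j := by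
  unfold agetf h0def
  rw [getD_modify, if_neg (by omega), getD_modify, if_neg (by omega)]

lemma h0_top (g : List (List Int)) (R C j : Nat) (hrect : Rect g R C) (hR : 2 ≤ R) (hC : 2 ≤ C)
    (hj : j < C) :
    agetf (h0def g R) 0 j = if j = 0 then agetf g 0 (C-1) else agetf g 0 (j-1) := by
  have hlen : 0 < g.length := by rw [hrect.1]; omega
  unfold agetf h0def
  rw [getD_modify, if_neg (by omega), getD_modify, if_pos (by exact ⟨rfl, hlen⟩)]
  rw [rotR_getD _ _ (by rw [rect_rowlen hrect 0 (by omega)]; omega)]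
  rw [rect_rowlen hrect 0 (by omega)]

lemma h0_bot (g : List (List Int)) (R C j : Nat) (hrect : Rect g R C) (hR : 2 ≤ R) (hC : 2 ≤ C)
    (hj : j < C) :
    agetf (h0def g R) (R-1) j = if j = C-1 then agetf g (R-1) 0 else agetf g (R-1) (j+1) := by
  have hlen : R - 1 < g.length := by rw [hrect.1]; omega
  unfold agetf h0def
  rw [getD_modify, if_pos (by exact ⟨rfl, by simpa using hlen⟩), getD_modify, if_neg (by omega)]
  rw [rotL_getD _ _ (by rw [rect_rowlen hrect (R-1) (by omega)]; omega)]
  rw [rect_rowlen hrect (R-1) (by omega)]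

-- A's loop, characterised
lemma fold_inv (g : List (List Int)) (R C : Nat) (hrect : Rect g R C) (hR : 2 ≤ R) (hC : 2 ≤ C)
    (m : Nat) (hm : m ≤ R - 2) :
    ((List.range m).foldl (stepN R C) (h0def g R)).length = R ∧
    (∀ i, (((List.range m).foldl (stepN R C) (h0def g R)).getD i []).length = (g.getD i []).length) ∧
    (∀ i j, agetf ((List.range m).foldl (stepN R C) (h0def g R)) i j =
      if j = 0 ∧ i < m then agetf g (i+1) 0
      else if j = C-1 ∧ R ≤ i + m ∧ i < R then agetf g (i-1) (C-1)
      else agetf (h0def g R) i j) := by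
  induction m with
  | zero =>
    refine ⟨by rw [List.range_zero, List.foldl_nil, h0_len]; exact hrect.1,
           fun i => by rw [List.range_zero, List.foldl_nil]; exact h0_rowlen g R i,
           fun i j => ?_⟩
    rw [List.range_zero, List.foldl_nil, if_neg (by omega), if_neg (by omega)]
  | succ m ih =>
    obtain ⟨ihlen, ihrow, ihcell⟩ := ih (by omega)
    set F := (List.range m).foldl (stepN R C) (h0def g R) with hF
    have hstep : (List.range (m+1)).foldl (stepN R C) (h0def g R) = stepN R C F m := by
      rw [List.range_succ, List.foldl_append, List.foldl_cons, List.foldl_nil]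
    have hFrowC : ∀ i, i < R → (F.getD i []).length = C := fun i hi => by
      rw [ihrow i]; exact rect_rowlen hrect i hi
    have hread1 : agetf F (m+1) 0 = agetf g (m+1) 0 := by
      rw [ihcell, if_neg (by omega), if_neg (by omega), h0_mid g R _ 0 (by omega) (by omega)]
    have hread2 : agetf (aset F m 0 (agetf F (m+1) 0)) (R-2-m) (C-1) = agetf g (R-2-m) (C-1) := by
      rw [agetf_aset, if_neg (by rintro ⟨-, -, h, -⟩; omega)]
      rw [ihcell, if_neg (by omega), if_neg (by omega), h0_mid g R _ (C-1) (by omega) (by omega)]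
    refine ⟨by rw [hstep, stepN, length_aset, length_aset, ihlen],
           fun i => by rw [hstep, stepN, rowlen_aset, rowlen_aset, ihrow], fun i j => ?_⟩
    rw [hstep, stepN]
    by_cases hc1 : i = R-1-m ∧ j = C-1
    · obtain ⟨hi, hj⟩ := hc1
      rw [agetf_aset, if_pos ⟨by omega, by rw [length_aset, ihlen]; omega, by omega,
        by rw [rowlen_aset, hFrowC i (by omega)]; omega⟩]
      rw [hread2, if_neg (by omega), if_pos ⟨by omega, by omega, by omega⟩]
      exact agetf_congr g (by omega) (by omega)
    · rw [agetf_aset, if_neg (by rintro ⟨h1, -, h3, -⟩; exact hc1 ⟨h1.symm, h3.symm⟩)]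
      by_cases hc2 : i = m ∧ j = 0
      · obtain ⟨hi, hj⟩ := hc2
        rw [agetf_aset, if_pos ⟨by omega, by rw [ihlen]; omega, by omega,
          by rw [hFrowC i (by omega)]; omega⟩]
        rw [hread1, if_pos ⟨by omega, by omega⟩]
        exact agetf_congr g (by omega) (by omega)
      · rw [agetf_aset, if_neg (by rintro ⟨h1, -, h3, -⟩; exact hc2 ⟨h1.symm, h3.symm⟩)]
        rw [ihcell]
        split_ifs <;> first
          | rfl
          | exact agetf_congr g (by omega) (by omega)
          | omega

-- the down-counting range as a plain List.range
lemma pyRangeDown (R : Int) (h : 2 ≤ R) :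
    PySem.List.pyRange R 2 (-1) = (List.range (R-2).toNat).map (fun k : Nat => R + -1 * (k : Int)) := by
  simp only [PySem.List.pyRange]
  rw [if_neg (by norm_num)]
  congr 2
  rw [if_neg (by norm_num)]
  by_cases h2 : 2 < R
  · rw [if_pos h2]
    congr 1
    norm_num
  · rw [if_neg h2]
    have : R = 2 := by omega
    simp [this]

-- rotateA in clean form
lemma rotateA_clean (g : List (List Int)) (R C : Nat) (hR : 2 ≤ R) :
    rotateA g R C =
      aset (aset ((List.range (R-2)).foldl (stepN R C) (h0def g R)) 1 (C-1) (agetf g 0 (C-1)))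
        (R-2) 0 (agetf g (R-1) 0) := by
  unfold rotateA
  change aset (aset ((PySem.List.pyRange (R : Int) 2 (-1)).foldl
      (fun h i => aset (aset h (R - i.toNat) 0 (agetf h (R - i.toNat + 1) 0)) (i.toNat - 1) (C-1)
        (agetf (aset h (R - i.toNat) 0 (agetf h (R - i.toNat + 1) 0)) (i.toNat - 2) (C-1)))
      ((g.modify 0 rotR).modify (R-1) rotL)) 1 (C-1) (agetf g 0 (C-1))) (R-2) 0 (agetf g (R-1) 0) = _
  rw [pyRangeDown _ (by exact_mod_cast hR), List.foldl_map]
  have hto : ((R:Int) - 2).toNat = R - 2 := by omega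
  rw [hto]
  congr 2
  apply PySem.List.foldl_congr_mem
  intro acc x hx
  have hx' : x < R - 2 := List.mem_range.mp hx
  have e1 : ((R:Int) + -1 * (x:Int)).toNat = R - x := by omega
  rw [e1]
  have e2 : R - (R - x) = x := by omega
  have e3 : R - x - 1 = R - 1 - x := by omega
  have e4 : R - x - 2 = R - 2 - x := by omega
  rw [e2, e3, e4, stepN]

-- A's rotation, pointwise
lemma rotateA_cell (g : List (List Int)) (R C : Nat) (hrect : Rect g R C) (hR : 2 ≤ R) (hC : 2 ≤ C) :
    (rotateA g R C).length = R ∧ (∀ i, i < R → ((rotateA g R C).getD i []).length = C) ∧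
    (∀ i j, i < R → j < C → agetf (rotateA g R C) i j = specCell g R C i j) := by
  obtain ⟨flen, frow, fcell⟩ := fold_inv g R C hrect hR hC (R-2) (le_refl _)
  set F := (List.range (R-2)).foldl (stepN R C) (h0def g R) with hF
  have hFrowC : ∀ i, i < R → (F.getD i []).length = C := fun i hi => by
    rw [frow i]; exact rect_rowlen hrect i hi
  rw [rotateA_clean g R C hR]
  refine ⟨by rw [length_aset, length_aset, flen],
         fun i hi => by rw [rowlen_aset, rowlen_aset]; exact hFrowC i hi,
         fun i j hi hj => ?_⟩
  rw [agetf_aset]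
  by_cases hA : i = R-2 ∧ j = 0
  · obtain ⟨hi2, hj2⟩ := hA
    rw [if_pos ⟨by omega, by rw [length_aset, flen]; omega, by omega,
      by rw [rowlen_aset, hFrowC i hi]; omega⟩]
    unfold specCell
    split_ifs <;> first
      | exact agetf_congr g (by omega) (by omega)
      | omega
  · rw [if_neg (by rintro ⟨h1, -, h3, -⟩; exact hA ⟨h1.symm, h3.symm⟩), agetf_aset]
    by_cases hB : i = 1 ∧ j = C-1
    · obtain ⟨hi2, hj2⟩ := hB
      rw [if_pos ⟨by omega, by rw [flen]; omega, by omega, by rw [hFrowC i hi]; omega⟩]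
      unfold specCell
      split_ifs <;> first
        | exact agetf_congr g (by omega) (by omega)
        | omega
    · rw [if_neg (by rintro ⟨h1, -, h3, -⟩; exact hB ⟨h1.symm, h3.symm⟩), fcell]
      by_cases d1 : j = 0 ∧ i < R-2
      · rw [if_pos d1]
        unfold specCell
        split_ifs <;> first
          | exact agetf_congr g (by omega) (by omega)
          | omega
      · rw [if_neg d1]
        by_cases d2 : j = C-1 ∧ R ≤ i + (R-2) ∧ i < R
        · rw [if_pos d2]
          unfold specCell
          split_ifs <;> first
            | exact agetf_congr g (by omega) (by omega)
            | omega
        · rw [if_neg d2]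
          by_cases hi0 : i = 0
          · subst hi0
            rw [h0_top g R C j hrect hR hC hj]
            unfold specCell
            split_ifs <;> first
              | rfl
              | exact agetf_congr g (by omega) (by omega)
              | omega
          · by_cases hiR : i = R-1
            · subst hiR
              rw [h0_bot g R C j hrect hR hC hj]
              unfold specCell
              split_ifs <;> first
                | rfl
                | exact agetf_congr g (by omega) (by omega)
                | omega
            · rw [h0_mid g R i j (by omega) (by omega)]
              unfold specCell
              split_ifs <;> first
                | rfl
                | exact agetf_congr g (by omega) (by omega)
                | omega

-- B-side getD toolbox
lemma getD_cons (a : Int) (l : List Int) (j : Nat) :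
    (a :: l).getD j 0 = if j = 0 then a else l.getD (j-1) 0 := by
  cases j <;> simp

lemma getD_append (l1 l2 : List Int) (j : Nat) :
    (l1 ++ l2).getD j 0 = if j < l1.length then l1.getD j 0 else l2.getD (j - l1.length) 0 := by
  simp only [List.getD_eq_getElem?_getD, List.getElem?_append]
  split <;> rfl

lemma getD_drop (l : List Int) (k j : Nat) : (l.drop k).getD j 0 = l.getD (k+j) 0 := by
  simp only [List.getD_eq_getElem?_getD, List.getElem?_drop]

lemma getD_dropLast (l : List Int) (j : Nat) (h : j < l.length - 1) :
    l.dropLast.getD j 0 = l.getD j 0 := by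
  simp only [List.getD_eq_getElem?_getD, List.getElem?_dropLast]
  rw [if_pos h]

lemma zipWith3_eq (f : List Int → List Int → List Int → List Int) (as bs cs : List (List Int)) :
    List.zipWith3 f as bs cs = List.zipWith (fun p c => f p.1 p.2 c) (as.zip bs) cs := by
  induction as generalizing bs cs with
  | nil => simp [List.zipWith3]
  | cons a as ih => cases bs <;> cases cs <;> simp [List.zipWith3, ih]

-- B's rows, characterised
lemma rotateB_len (g : List (List Int)) (R C : Nat) (hrect : Rect g R C) (hR : 2 ≤ R) :
    (rotateB g).length = R := by
  have h1 : g.length = R := hrect.1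
  simp only [rotateB, List.length_cons, List.length_append, zipWith3_eq, List.length_zipWith,
    List.length_zip, List.length_drop, List.length_nil, h1]
  omega

lemma rotateB_row (g : List (List Int)) (R C : Nat) (hrect : Rect g R C) (hR : 2 ≤ R) (i : Nat)
    (hi : i < R) :
    (rotateB g).getD i [] =
      if i = 0 then (g.getD 1 []).getD 0 0 :: (g.getD 0 []).dropLast
      else if i = R-1 then (g.getD (R-1) []).drop 1 ++ [bLast (g.getD (R-2) [])]
      else bRow (g.getD (i-1) []) (g.getD i []) (g.getD (i+1) []) := by
  have hgl : g.length = R := hrect.1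
  have hmidlen : (List.zipWith (fun p c => bRow p.1 p.2 c) (g.zip (g.drop 1)) (g.drop 2)).length
      = R - 2 := by
    rw [List.length_zipWith, List.length_zip]
    simp [hgl]
    omega
  have hrB : rotateB g =
      ((g.getD 1 []).getD 0 0 :: (g.getD 0 []).dropLast) ::
        (List.zipWith (fun p c => bRow p.1 p.2 c) (g.zip (g.drop 1)) (g.drop 2) ++
          [(g.getD (g.length - 1) []).drop 1 ++ [bLast (g.getD (g.length - 2) [])]]) := by
    rw [show rotateB g =
      ((g.getD 1 []).getD 0 0 :: (g.getD 0 []).dropLast) ::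
        (List.zipWith3 bRow g (g.drop 1) (g.drop 2) ++
          [(g.getD (g.length - 1) []).drop 1 ++ [bLast (g.getD (g.length - 2) [])]]) from rfl,
      zipWith3_eq]
  have hlen : (rotateB g).length = R := rotateB_len g R C hrect hR
  rw [hrB, getDrow _ i (by rw [← hrB, hlen]; omega)]
  by_cases hi0 : i = 0
  · subst hi0
    rw [if_pos rfl]
    simp
  · rw [if_neg hi0]
    obtain ⟨i', rfl⟩ : ∃ i', i = i'+1 := ⟨i-1, by omega⟩
    rw [List.getElem_cons_succ, List.getElem_append]
    by_cases hiR : i'+1 = R-1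
    · rw [if_pos hiR, dif_neg (by rw [hmidlen]; omega), List.getElem_singleton, hgl]
    · rw [if_neg hiR, dif_pos (by rw [hmidlen]; omega)]
      rw [List.getElem_zipWith, List.getElem_zip]
      simp only [List.getElem_drop]
      have e1 : g[i'] = g.getD (i'+1-1) [] := by
        rw [getDrow g _ (by omega)]
        simp
      have e2 : g[1+i'] = g.getD (i'+1) [] := by
        rw [getDrow g _ (by omega)]
        congr 1
        omega
      have e3 : g[2+i'] = g.getD (i'+1+1) [] := by
        rw [getDrow g _ (by omega)]
        congr 1
        omega
      rw [e1, e2, e3]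

lemma rotateB_cell (g : List (List Int)) (R C : Nat) (hrect : Rect g R C) (hR : 2 ≤ R) (hC : 2 ≤ C) :
    (∀ i, i < R → ((rotateB g).getD i []).length = C) ∧
    (∀ i j, i < R → j < C → agetf (rotateB g) i j = specCell g R C i j) := by
  have hgl : g.length = R := hrect.1
  have rowC : ∀ k, k < R → (g.getD k []).length = C := fun k hk => rect_rowlen hrect k hk
  constructor
  · intro i hi
    rw [rotateB_row g R C hrect hR i hi]
    by_cases hi0 : i = 0
    · rw [if_pos hi0]
      simp only [List.length_cons, List.length_dropLast, rowC 0 (by omega)]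
      omega
    · rw [if_neg hi0]
      by_cases hiR : i = R-1
      · rw [if_pos hiR]
        simp only [List.length_append, List.length_drop, List.length_cons, List.length_nil,
          rowC (R-1) (by omega)]
        omega
      · rw [if_neg hiR]
        simp only [bRow, List.length_cons, List.length_append, List.length_dropLast,
          List.length_drop, List.length_nil, rowC i hi]
        omega
  · intro i j hi hj
    rw [agetf, rotateB_row g R C hrect hR i hi]
    by_cases hi0 : i = 0
    · subst hi0
      rw [if_pos rfl, getD_cons]
      by_cases hj0 : j = 0
      · rw [if_pos hj0]
        unfold specCell
        rw [if_pos rfl, if_pos hj0]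
        rfl
      · rw [if_neg hj0, getD_dropLast _ _ (by rw [rowC 0 (by omega)]; omega)]
        unfold specCell
        rw [if_pos rfl, if_neg hj0]
        rfl
    · rw [if_neg hi0]
      by_cases hiR : i = R-1
      · rw [if_pos hiR, getD_append]
        by_cases hjC : j = C-1
        · rw [if_neg (by simp only [List.length_drop, rowC (R-1) (by omega)]; omega)]
          have : j - ((g.getD (R-1) []).drop 1).length = 0 := by
            simp only [List.length_drop, rowC (R-1) (by omega)]
            omega
          rw [this, getD_cons, if_pos rfl, bLast, rowC (R-2) (by omega)]
          unfold specCell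
          rw [if_neg hi0, if_pos hiR, if_pos hjC]
          rfl
        · rw [if_pos (by simp only [List.length_drop, rowC (R-1) (by omega)]; omega)]
          rw [getD_drop]
          unfold specCell
          rw [if_neg hi0, if_pos hiR, if_neg hjC]
          exact agetf_congr g rfl (by omega)
      · rw [if_neg hiR, bRow, getD_cons]
        by_cases hj0 : j = 0
        · rw [if_pos hj0]
          unfold specCell
          rw [if_neg hi0, if_neg hiR, if_pos hj0]
          rfl
        · rw [if_neg hj0, getD_append]
          by_cases hjC : j = C-1
          · rw [if_neg (by simp only [List.length_dropLast, List.length_drop, rowC i hi]; omega)]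
            have : j - 1 - ((g.getD i []).drop 1).dropLast.length = 0 := by
              simp only [List.length_dropLast, List.length_drop, rowC i hi]
              omega
            rw [this, getD_cons, if_pos rfl, bLast, rowC (i-1) (by omega)]
            unfold specCell
            rw [if_neg hi0, if_neg hiR, if_neg (by omega), if_pos hjC]
            rfl
          · rw [if_pos (by simp only [List.length_dropLast, List.length_drop, rowC i hi]; omega)]
            rw [getD_dropLast _ _ (by simp only [List.length_drop, rowC i hi]; omega), getD_drop]
            unfold specCell
            rw [if_neg hi0, if_neg hiR]
            by_cases hj0' : j = 0
            · omega
            · rw [if_neg hj0', if_neg hjC]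
              exact agetf_congr g rfl (by omega)

lemma rotate_eq (g : List (List Int)) (R C : Nat) (hrect : Rect g R C) (hR : 2 ≤ R) (hC : 2 ≤ C) :
    rotateA g R C = rotateB g := by
  obtain ⟨hAl, hArow, hAcell⟩ := rotateA_cell g R C hrect hR hC
  obtain ⟨hBrow, hBcell⟩ := rotateB_cell g R C hrect hR hC
  have hBl := rotateB_len g R C hrect hR
  apply grid_ext
  · rw [hAl, hBl]
  · intro i hi
    rw [hAl] at hi
    rw [hArow i hi, hBrow i hi]
  · intro i j hi hj
    rw [hAl] at hi
    rw [hArow i hi] at hj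
    rw [hAcell i j hi hj, hBcell i j hi hj]

lemma rect_rotateB (g : List (List Int)) (R C : Nat) (hrect : Rect g R C) (hR : 2 ≤ R) (hC : 2 ≤ C) :
    Rect (rotateB g) R C := by
  refine ⟨rotateB_len g R C hrect hR, fun row hrow => ?_⟩
  obtain ⟨k, hk, hkeq⟩ := List.mem_iff_getElem.mp hrow
  have hkR : k < R := by rw [rotateB_len g R C hrect hR] at hk; exact hk
  have := (rotateB_cell g R C hrect hR hC).1 k hkR
  rw [getDrow _ _ hk] at this
  rw [← hkeq]
  exact this

lemma shift_eq (g : List (List Int)) (h : g ≠ []) : shiftA g = shiftB g := by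
  obtain ⟨l, a, rfl⟩ := (List.eq_nil_or_concat g).resolve_left h
  simp only [List.concat_eq_append, shiftA, shiftB]
  have hl : (l ++ [a]).length - 1 = l.length := by simp
  rw [hl, List.drop_left, List.getD_eq_getElem?_getD,
    List.getElem?_append_right (le_refl _)]
  simp

lemma shiftB_len (g : List (List Int)) (h : g ≠ []) : (shiftB g).length = g.length := by
  simp only [shiftB, List.length_cons, List.length_dropLast]
  have := List.length_pos_iff.mpr h
  omega

lemma rect_shiftB (g : List (List Int)) (R C : Nat) (hrect : Rect g R C) (hR : 1 ≤ R) :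
    Rect (shiftB g) R C := by
  have hne : g ≠ [] := by
    intro h
    rw [h] at hrect
    have := hrect.1
    simp at this
    omega
  refine ⟨by rw [shiftB_len g hne]; exact hrect.1, fun row hrow => ?_⟩
  rcases List.mem_cons.mp hrow with h | h
  · subst h
    refine hrect.2 _ ?_
    rw [getDrow g _ (by have := List.length_pos_iff.mpr hne; omega)]
    exact List.getElem_mem _
  · exact hrect.2 row ((List.dropLast_sublist g).subset h)

lemma mapRange_getD (g : List (List Int)) (R : Nat) (h : g.length = R) :
    (List.range R).map (fun i => g.getD i []) = g := by
  apply List.ext_getElem (by simp [h])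
  intro i h1 h2
  simp only [List.getElem_map, List.getElem_range]
  exact getDrow g i h2

-- the operation folds agree
lemma fold_ops_rect (R C : Nat) (hR : 2 ≤ R) (hC : 2 ≤ C) (ops : List String) :
    ∀ g : List (List Int), Rect g R C →
      ops.foldl (fun g op => if op == "Rotate" then rotateA g R C else shiftA g) g =
        ops.foldl (fun g op => if op == "Rotate" then rotateB g else shiftB g) g ∧
      Rect (ops.foldl (fun g op => if op == "Rotate" then rotateB g else shiftB g) g) R C := by
  induction ops with
  | nil => exact fun g hg => ⟨rfl, hg⟩
  | cons op ops ih =>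
    intro g hg
    simp only [List.foldl_cons]
    by_cases hop : (op == "Rotate") = true
    · rw [if_pos hop, if_pos hop, rotate_eq g R C hg hR hC]
      exact ih _ (rect_rotateB g R C hg hR hC)
    · have hne : g ≠ [] := by
        intro h
        rw [h] at hg
        have := hg.1
        simp at this
        omega
      rw [if_neg hop, if_neg hop, shift_eq g hne]
      exact ih _ (rect_shiftB g R C hg (by omega))

lemma fold_ops_norot (R C : Nat) :
    ∀ (ops : List String), "Rotate" ∉ ops → ∀ g : List (List Int), g ≠ [] →
      ops.foldl (fun g op => if op == "Rotate" then rotateA g R C else shiftA g) g =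
        ops.foldl (fun g op => if op == "Rotate" then rotateB g else shiftB g) g ∧
      (ops.foldl (fun g op => if op == "Rotate" then rotateB g else shiftB g) g).length = g.length := by
  intro ops
  induction ops with
  | nil => exact fun _ g _ => ⟨rfl, rfl⟩
  | cons op ops ih =>
    intro hno g hne
    have hop : ¬((op == "Rotate") = true) := by
      simp only [beq_iff_eq]
      intro h
      exact hno (by rw [h]; exact List.mem_cons_self)
    have hno' : "Rotate" ∉ ops := fun h => hno (List.mem_cons_of_mem _ h)
    simp only [List.foldl_cons]
    rw [if_neg hop, if_neg hop, shift_eq g hne]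
    obtain ⟨h1, h2⟩ := ih hno' (shiftB g) (List.cons_ne_nil _ _)
    exact ⟨h1, by rw [h2, shiftB_len g hne]⟩

-- ===== VERDICT (by name: the statement is the Claim_ definition above) =====
theorem solution_spec : Claim_equal_solution := by
  intro rc ops _hdom hpre
  obtain ⟨hne, hrot⟩ := hpre
  show solution rc ops = solution_alt rc ops
  have hshow : solution rc ops = (List.range rc.length).map
      (fun i => (ops.foldl (fun g op =>
        if op == "Rotate" then rotateA g rc.length ((rc.getD 0 []).length) else shiftA g)
        rc).getD i []) := rfl
  rw [hshow, solution_alt]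
  by_cases hmem : "Rotate" ∈ ops
  · obtain ⟨hR, hC, hrows⟩ := hrot hmem
    have hrect : Rect rc rc.length ((rc.getD 0 []).length) := ⟨rfl, hrows⟩
    obtain ⟨heq, hrectB⟩ :=
      fold_ops_rect rc.length ((rc.getD 0 []).length) hR hC ops rc hrect
    rw [heq, mapRange_getD _ _ hrectB.1]
  · obtain ⟨heq, hlen⟩ := fold_ops_norot rc.length ((rc.getD 0 []).length) ops hmem rc hne
    rw [heq, mapRange_getD _ _ hlen]
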